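-- pv_equiv track=rewrite | github.com/Pamk12/Smart-Task-Analyzer | backend/tasks/scoring.py | _downstream_block_count
-- ===== SOURCE A (Python) =====
-- from typing import Any, Dict, List, Optional, Set, Tuple
--
-- def _downstream_block_count(task_id: int, reverse: Dict[int, List[int]]) -> int:
--     """Count tasks that (directly or transitively) depend on task_id."""
--     seen: Set[int] = set()
--     stack = list(reverse.get(task_id, []))
--     while stack:
--         u = stack.pop()
--         if u in seen:
--             continue
--         seen.add(u)
--         stack.extend(reverse.get(u, []))
--     return len(seen)
-- ===== SOURCE B (Python) =====
-- def _downstream_block_count(task_id: int, reverse) -> int: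
--     """Count tasks that (directly or transitively) depend on task_id.
--
--     Level-by-level saturation (frontier BFS) instead of an explicit stack DFS.
--     """
--     seen = set(reverse.get(task_id, []))
--     frontier = set(seen)
--     while frontier:
--         frontier = {v for u in frontier for v in reverse.get(u, [])} - seen
--         seen |= frontier
--     return len(seen)
-- ===== Notes on version B (the rewrite author's own statement) =====
-- stated objective: alternative
-- what changed: Replaced the explicit LIFO stack DFS (pop one node, push its neighbours) with level-by-level frontier saturation: each round expands the whole frontier at once via a set comprehension and subtracts the already-seen set, stopping when the frontier is empty.
import Mathlib
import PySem

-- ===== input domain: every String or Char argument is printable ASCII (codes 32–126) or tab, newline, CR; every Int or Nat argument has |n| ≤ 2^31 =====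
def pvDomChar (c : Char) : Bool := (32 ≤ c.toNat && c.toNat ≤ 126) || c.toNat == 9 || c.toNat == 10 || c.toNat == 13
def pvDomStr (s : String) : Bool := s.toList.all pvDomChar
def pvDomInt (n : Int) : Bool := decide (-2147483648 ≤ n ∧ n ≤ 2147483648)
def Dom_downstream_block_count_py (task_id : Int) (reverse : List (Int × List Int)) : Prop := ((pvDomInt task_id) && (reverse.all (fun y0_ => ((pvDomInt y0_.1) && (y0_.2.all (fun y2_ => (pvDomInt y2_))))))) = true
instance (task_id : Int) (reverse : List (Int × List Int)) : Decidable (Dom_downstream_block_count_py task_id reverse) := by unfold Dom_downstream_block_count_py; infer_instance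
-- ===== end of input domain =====

-- B replaces A's explicit-stack DFS by level-by-level frontier saturation (same asymptotic cost);
-- equal return value is proved for all inputs (both functions are total).

-- reverse.get(u, []) — shared by both ports (it is the same Python expression in both sources)
def pvNbrs (reverse : List (Int × List Int)) (u : Int) : List Int :=
  PySem.Dict.getD (PySem.Dict.mk reverse) u []

-- all values appearing in the dict's value lists (termination bound only)
def pvVals (reverse : List (Int × List Int)) : List Int :=
  reverse.flatMap (fun p => p.2)

theorem pvNbrs_mem_vals {reverse : List (Int × List Int)} {u x : Int}
    (h : x ∈ pvNbrs reverse u) : x ∈ pvVals reverse := by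
  induction reverse with
  | nil => simp [pvNbrs, PySem.Dict.getD_eq_get?_getD, PySem.Dict.get?] at h
  | cons p rest ih =>
    obtain ⟨k, v⟩ := p
    rw [pvNbrs, PySem.Dict.getD_eq_get?_getD, PySem.Dict.get?_mk_cons] at h
    by_cases hk : (k == u) = true
    · simp [hk] at h
      simp [pvVals]
      exact Or.inl h
    · simp [hk] at h
      have : x ∈ pvVals rest := ih (by rwa [pvNbrs, PySem.Dict.getD_eq_get?_getD])
      simp [pvVals] at this ⊢
      exact Or.inr this

theorem pvNbrs_len_le (reverse : List (Int × List Int)) (u : Int) :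
    (pvNbrs reverse u).length ≤ (pvVals reverse).length := by
  induction reverse with
  | nil => simp [pvNbrs, PySem.Dict.getD_eq_get?_getD, PySem.Dict.get?]
  | cons p rest ih =>
    obtain ⟨k, v⟩ := p
    rw [pvNbrs, PySem.Dict.getD_eq_get?_getD, PySem.Dict.get?_mk_cons]
    by_cases hk : (k == u) = true
    · simp [hk, pvVals]
    · rw [if_neg hk]
      unfold pvNbrs at ih
      rw [PySem.Dict.getD_eq_get?_getD] at ih
      have h2 : pvVals ((k, v) :: rest) = v ++ pvVals rest := by simp [pvVals]
      rw [h2, List.length_append]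
      omega

-- number of dict values not yet seen (termination measure only)
def pvUnseen (reverse : List (Int × List Int)) (seen : List Int) : Nat :=
  ((PySem.List.dedup (pvVals reverse)).filter (fun x => decide (x ∉ seen))).length

theorem pvUnseen_lt_of (reverse : List (Int × List Int)) {seen seen' : List Int} {u : Int}
    (hsub : ∀ x ∈ seen, x ∈ seen') (hu : u ∈ pvVals reverse) (hu2 : u ∉ seen) (hu3 : u ∈ seen') :
    pvUnseen reverse seen' < pvUnseen reverse seen := by
  unfold pvUnseen
  have h1 : (PySem.List.dedup (pvVals reverse)).filter (fun x => decide (x ∉ seen')) =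
      ((PySem.List.dedup (pvVals reverse)).filter (fun x => decide (x ∉ seen))).filter
        (fun x => decide (x ∉ seen')) := by
    rw [List.filter_filter]
    apply List.filter_congr
    intro x _
    by_cases h : x ∈ seen'
    · simp [h]
    · have : x ∉ seen := fun hh => h (hsub x hh)
      simp [h, this]
  rw [h1]
  apply List.length_filter_lt_length_iff_exists.mpr
  refine ⟨u, ?_, by simp [hu3]⟩
  simp [List.mem_filter, PySem.List.mem_dedup, hu, hu2]

-- ===== PORT A =====
-- while stack: u = stack.pop(); if u in seen: continue; seen.add(u); stack.extend(reverse.get(u, []))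
-- The Lean stack list holds Python's stack reversed (head = Python's top), so pop = head and
-- extend = push the reversed neighbour list in front.  The extra `hs` argument is a termination
-- proof only (every stack element is a dict value); it carries no computational content.
def pvALoop (reverse : List (Int × List Int)) (stack : List Int) (seen : PySem.Set Int)
    (hs : ∀ x ∈ stack, x ∈ pvVals reverse) : PySem.Set Int :=
  match stack with
  | [] => seen
  | u :: rest =>
    if hu : u ∈ seen then
      pvALoop reverse rest seen (fun x hx => hs x (List.mem_cons_of_mem _ hx))
    else
      pvALoop reverse ((pvNbrs reverse u).reverse ++ rest) (PySem.Set.add seen u)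
        (fun x hx => by
          rcases List.mem_append.mp hx with h | h
          · exact pvNbrs_mem_vals (List.mem_reverse.mp h)
          · exact hs x (List.mem_cons_of_mem _ h))
  termination_by pvUnseen reverse seen * ((pvVals reverse).length + 1) + stack.length
  decreasing_by
  · simp
  · have hlt : pvUnseen reverse (PySem.Set.add seen u) < pvUnseen reverse seen := by
      refine pvUnseen_lt_of reverse (fun x hx => ?_) (hs u (List.mem_cons_self)) hu ?_
      · exact (PySem.Set.mem_add seen u x).mpr (Or.inl hx)
      · exact (PySem.Set.mem_add seen u u).mpr (Or.inr rfl)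
    have hlen := pvNbrs_len_le reverse u
    have hmul : pvUnseen reverse (PySem.Set.add seen u) * ((pvVals reverse).length + 1)
        + ((pvVals reverse).length + 1)
        ≤ pvUnseen reverse seen * ((pvVals reverse).length + 1) := by
      calc pvUnseen reverse (PySem.Set.add seen u) * ((pvVals reverse).length + 1)
            + ((pvVals reverse).length + 1)
          = (pvUnseen reverse (PySem.Set.add seen u) + 1) * ((pvVals reverse).length + 1) := by ring
        _ ≤ pvUnseen reverse seen * ((pvVals reverse).length + 1) :=
            Nat.mul_le_mul_right _ hlt
    simp only [List.length_append, List.length_reverse, List.length_cons]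
    omega

def downstream_block_count_py (task_id : Int) (reverse : List (Int × List Int)) : Int :=
  PySem.Set.len (pvALoop reverse (pvNbrs reverse task_id).reverse PySem.Set.empty
    (fun x hx => pvNbrs_mem_vals (List.mem_reverse.mp hx)))

-- ===== PORT B =====
-- while frontier: frontier = {v for u in frontier for v in reverse.get(u, [])} - seen; seen |= frontier
-- pvNew is the comprehension-minus-seen expression; only len(seen) is returned, so the
-- unmodelled Python set iteration order cannot influence the result.
def pvNew (reverse : List (Int × List Int)) (seen : PySem.Set Int) (frontier : List Int) :
    PySem.Set Int :=
  PySem.Set.diff (PySem.Set.ofList (frontier.flatMap (pvNbrs reverse))) seen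

theorem mem_pvNew {reverse : List (Int × List Int)} {seen : PySem.Set Int} {frontier : List Int}
    {x : Int} : x ∈ pvNew reverse seen frontier ↔
      (∃ u ∈ frontier, x ∈ pvNbrs reverse u) ∧ x ∉ seen := by
  simp [pvNew, PySem.Set.mem_diff, PySem.Set.mem_ofList, List.mem_flatMap]

def pvBLoop (reverse : List (Int × List Int)) (seen : PySem.Set Int) (frontier : List Int) :
    PySem.Set Int :=
  if h : frontier = [] then seen
  else
    let f : PySem.Set Int := pvNew reverse seen frontier
    pvBLoop reverse (PySem.Set.union seen f) f
  termination_by pvUnseen reverse seen * 2 + (if frontier = [] then 0 else 1)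
  decreasing_by
  rcases eq_or_ne (pvNew reverse seen frontier) [] with hf | hf
  · simp only [hf]
    simp [PySem.Set.union, PySem.Set.update, h]
  · obtain ⟨v, hv⟩ := List.exists_mem_of_ne_nil _ hf
    have hv' := mem_pvNew.mp hv
    have hvvals : v ∈ pvVals reverse := by
      obtain ⟨w, _, hw2⟩ := hv'.1
      exact pvNbrs_mem_vals hw2
    have hlt : pvUnseen reverse (PySem.Set.union seen (pvNew reverse seen frontier))
        < pvUnseen reverse seen := by
      refine pvUnseen_lt_of reverse (fun x hx => ?_) hvvals hv'.2 ?_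
      · exact (PySem.Set.mem_union _ _ x).mpr (Or.inl hx)
      · exact (PySem.Set.mem_union _ _ v).mpr (Or.inr hv)
    rw [if_neg hf, if_neg h]
    omega

def downstream_block_count_py_alt (task_id : Int) (reverse : List (Int × List Int)) : Int :=
  PySem.Set.len (pvBLoop reverse (PySem.Set.ofList (pvNbrs reverse task_id))
    (PySem.Set.ofList (pvNbrs reverse task_id)))

-- ===== PRECONDITION & SPEC =====
def Spec_downstream_block_count_py (task_id : Int) (reverse : List (Int × List Int)) (out : Int) : Prop := out = downstream_block_count_py_alt task_id reverse
instance (task_id : Int) (reverse : List (Int × List Int)) (out : Int) : Decidable (Spec_downstream_block_count_py task_id reverse out) := by unfold Spec_downstream_block_count_py; infer_instance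

-- ===== CLAIM (what is proved, stated in full; the proofs are below) =====
def Claim_equal_downstream_block_count_py : Prop := ∀ (task_id : Int) (reverse : List (Int × List Int)), Dom_downstream_block_count_py task_id reverse → Spec_downstream_block_count_py task_id reverse (downstream_block_count_py task_id reverse)

-- ===== LEMMAS AND PROOFS =====

-- reachability along reversed edges, starting from the sources `srcs` (the direct dependants)
inductive pvRF (reverse : List (Int × List Int)) (srcs : List Int) : Int → Prop
  | base {v : Int} (h : v ∈ srcs) : pvRF reverse srcs v
  | step {u v : Int} (h1 : pvRF reverse srcs u) (h2 : v ∈ pvNbrs reverse u) : pvRF reverse srcs v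

theorem pvALoop_seen_subset (reverse : List (Int × List Int)) (stack : List Int)
    (seen : PySem.Set Int) (hs : ∀ x ∈ stack, x ∈ pvVals reverse) :
    ∀ x ∈ seen, x ∈ pvALoop reverse stack seen hs := by
  fun_induction pvALoop with
  | case1 => intro x hx; exact hx
  | case2 seen u rest hs hu _hs ih => exact ih
  | case3 seen u rest hs hu _hs ih =>
    intro x hx
    exact ih x ((PySem.Set.mem_add seen u x).mpr (Or.inl hx))

theorem pvALoop_stack_subset (reverse : List (Int × List Int)) (stack : List Int)
    (seen : PySem.Set Int) (hs : ∀ x ∈ stack, x ∈ pvVals reverse) :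
    ∀ x ∈ stack, x ∈ pvALoop reverse stack seen hs := by
  fun_induction pvALoop with
  | case1 => intro x hx; simp at hx
  | case2 seen u rest hs hu _hs ih =>
    intro x hx
    rcases List.mem_cons.mp hx with h | h
    · subst h; exact pvALoop_seen_subset _ _ _ _ x hu
    · exact ih x h
  | case3 seen u rest hs hu _hs ih =>
    intro x hx
    rcases List.mem_cons.mp hx with h | h
    · subst h
      exact pvALoop_seen_subset _ _ _ _ x ((PySem.Set.mem_add seen x x).mpr (Or.inr rfl))
    · exact ih x (List.mem_append_right _ h)

theorem pvALoop_closed (reverse : List (Int × List Int)) (stack : List Int)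
    (seen : PySem.Set Int) (hs : ∀ x ∈ stack, x ∈ pvVals reverse) :
    ∀ u, u ∈ pvALoop reverse stack seen hs → u ∉ seen →
      ∀ v ∈ pvNbrs reverse u, v ∈ pvALoop reverse stack seen hs := by
  fun_induction pvALoop with
  | case1 => intro u hu hu2 v hv; exact absurd hu hu2
  | case2 seen u0 rest hs hu0 _hs ih => exact ih
  | case3 seen u0 rest hs hu0 _hs ih =>
    intro u hu hu2 v hv
    by_cases he : u = u0
    · subst he
      exact pvALoop_stack_subset _ _ _ _ v
        (List.mem_append_left _ (List.mem_reverse.mpr hv))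
    · refine ih u hu ?_ v hv
      intro hmem
      rcases (PySem.Set.mem_add seen u0 u).mp hmem with h | h
      · exact hu2 h
      · exact he h

theorem pvALoop_sound (reverse : List (Int × List Int)) (stack : List Int)
    (seen : PySem.Set Int) (hs : ∀ x ∈ stack, x ∈ pvVals reverse) (srcs : List Int)
    (h1 : ∀ x ∈ stack, pvRF reverse srcs x) (h2 : ∀ x ∈ seen, pvRF reverse srcs x) :
    ∀ x ∈ pvALoop reverse stack seen hs, pvRF reverse srcs x := by
  fun_induction pvALoop with
  | case1 => exact fun x hx => h2 x hx
  | case2 seen u rest hs hu _hs ih =>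
    exact ih (fun x hx => h1 x (List.mem_cons_of_mem _ hx)) h2
  | case3 seen u rest hs hu _hs ih =>
    refine ih ?_ ?_
    · intro x hx
      rcases List.mem_append.mp hx with h | h
      · exact pvRF.step (h1 u List.mem_cons_self) (List.mem_reverse.mp h)
      · exact h1 x (List.mem_cons_of_mem _ h)
    · intro x hx
      rcases (PySem.Set.mem_add seen u x).mp hx with h | h
      · exact h2 x h
      · exact h ▸ h1 u List.mem_cons_self

theorem pvALoop_nodup (reverse : List (Int × List Int)) (stack : List Int)
    (seen : PySem.Set Int) (hs : ∀ x ∈ stack, x ∈ pvVals reverse) (hn : seen.Nodup) :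
    (pvALoop reverse stack seen hs).Nodup := by
  fun_induction pvALoop with
  | case1 => exact hn
  | case2 seen u rest hs hu _hs ih => exact ih hn
  | case3 seen u rest hs hu _hs ih => exact ih (PySem.Set.nodup_add seen u hn)

theorem pvALoop_mem_iff (task_id : Int) (reverse : List (Int × List Int)) (x : Int) :
    x ∈ pvALoop reverse (pvNbrs reverse task_id).reverse PySem.Set.empty
        (fun x hx => pvNbrs_mem_vals (List.mem_reverse.mp hx)) ↔
      pvRF reverse (pvNbrs reverse task_id) x := by
  constructor
  · intro hx
    refine pvALoop_sound _ _ _ _ _ ?_ ?_ x hx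
    · exact fun y hy => pvRF.base (List.mem_reverse.mp hy)
    · intro y hy; simp [PySem.Set.empty] at hy
  · intro hr
    induction hr with
    | base h => exact pvALoop_stack_subset _ _ _ _ _ (List.mem_reverse.mpr h)
    | step h1 h2 ih =>
      exact pvALoop_closed _ _ _ _ _ ih (by simp [PySem.Set.empty]) _ h2

theorem pvBLoop_seen_subset (reverse : List (Int × List Int)) (seen : PySem.Set Int)
    (frontier : List Int) : ∀ x ∈ seen, x ∈ pvBLoop reverse seen frontier := by
  fun_induction pvBLoop with
  | case1 seen => exact fun x hx => hx
  | case2 seen frontier hfr f ih =>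
    intro x hx
    exact ih x ((PySem.Set.mem_union _ _ x).mpr (Or.inl hx))

theorem pvBLoop_sound (reverse : List (Int × List Int)) (seen : PySem.Set Int)
    (frontier : List Int) (srcs : List Int) :
    (∀ x ∈ seen, pvRF reverse srcs x) → (∀ x ∈ frontier, pvRF reverse srcs x) →
    ∀ x ∈ pvBLoop reverse seen frontier, pvRF reverse srcs x := by
  fun_induction pvBLoop with
  | case1 seen => exact fun h1 _ x hx => h1 x hx
  | case2 seen frontier hfr f ih =>
    intro h1 h2
    have hf : ∀ x ∈ pvNew reverse seen frontier, pvRF reverse srcs x := by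
      intro x hx
      obtain ⟨⟨u, hu1, hu2⟩, _⟩ := mem_pvNew.mp hx
      exact pvRF.step (h2 u hu1) hu2
    refine ih ?_ hf
    intro x hx
    rcases (PySem.Set.mem_union _ _ x).mp hx with h | h
    · exact h1 x h
    · exact hf x h

theorem pvBLoop_closed (reverse : List (Int × List Int)) (seen : PySem.Set Int)
    (frontier : List Int) :
    (∀ u ∈ seen, u ∈ frontier ∨ ∀ v ∈ pvNbrs reverse u, v ∈ seen) →
    ∀ u ∈ pvBLoop reverse seen frontier, ∀ v ∈ pvNbrs reverse u,
      v ∈ pvBLoop reverse seen frontier := by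
  fun_induction pvBLoop with
  | case1 seen =>
    intro hinv u hu v hv
    rcases hinv u hu with h | h
    · simp at h
    · exact h v hv
  | case2 seen frontier hfr f ih =>
    intro hinv
    refine ih ?_
    intro u hu
    rcases (PySem.Set.mem_union _ _ u).mp hu with h | h
    · rcases hinv u h with h' | h'
      · right
        intro v hv
        by_cases hvs : v ∈ seen
        · exact (PySem.Set.mem_union _ _ v).mpr (Or.inl hvs)
        · exact (PySem.Set.mem_union _ _ v).mpr
            (Or.inr (mem_pvNew.mpr ⟨⟨u, h', hv⟩, hvs⟩))
      · right
        intro v hv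
        exact (PySem.Set.mem_union _ _ v).mpr (Or.inl (h' v hv))
    · exact Or.inl h

theorem pvBLoop_nodup (reverse : List (Int × List Int)) (seen : PySem.Set Int)
    (frontier : List Int) : seen.Nodup → (pvBLoop reverse seen frontier).Nodup := by
  fun_induction pvBLoop with
  | case1 seen => exact fun hn => hn
  | case2 seen frontier hfr f ih => exact fun hn => ih (PySem.Set.nodup_union _ _ hn)

theorem pvBLoop_mem_iff (task_id : Int) (reverse : List (Int × List Int)) (x : Int) :
    x ∈ pvBLoop reverse (PySem.Set.ofList (pvNbrs reverse task_id))
        (PySem.Set.ofList (pvNbrs reverse task_id)) ↔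
      pvRF reverse (pvNbrs reverse task_id) x := by
  constructor
  · intro hx
    refine pvBLoop_sound _ _ _ _ ?_ ?_ x hx
    · exact fun y hy => pvRF.base ((PySem.Set.mem_ofList _ y).mp hy)
    · exact fun y hy => pvRF.base ((PySem.Set.mem_ofList _ y).mp hy)
  · intro hr
    induction hr with
    | base h =>
      exact pvBLoop_seen_subset _ _ _ _ ((PySem.Set.mem_ofList _ _).mpr h)
    | step h1 h2 ih =>
      exact pvBLoop_closed _ _ _ (fun u hu => Or.inl hu) _ ih _ h2

-- ===== VERDICT (by name: the statement is the Claim_ definition above) =====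
theorem downstream_block_count_py_spec : Claim_equal_downstream_block_count_py := by
  intro task_id reverse _hdom
  unfold Spec_downstream_block_count_py downstream_block_count_py downstream_block_count_py_alt
  have hperm : (pvALoop reverse (pvNbrs reverse task_id).reverse PySem.Set.empty
      (fun x hx => pvNbrs_mem_vals (List.mem_reverse.mp hx))).Perm
      (pvBLoop reverse (PySem.Set.ofList (pvNbrs reverse task_id))
        (PySem.Set.ofList (pvNbrs reverse task_id))) := by
    refine (List.perm_ext_iff_of_nodup ?_ ?_).mpr ?_
    · exact pvALoop_nodup _ _ _ _ (by simp [PySem.Set.empty])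
    · exact pvBLoop_nodup _ _ _ (PySem.Set.nodup_ofList _)
    · intro a
      rw [pvALoop_mem_iff, pvBLoop_mem_iff]
  simp only [PySem.Set.len, hperm.length_eq]
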